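-- pv_equiv track=rewrite | github.com/whiteshark05/Competitive-Programming | Codeforce/Goodbye 2022/C.py | solve
-- ===== SOURCE A (Python) =====
-- from math import gcd
--
-- def solve(n,a):
--     g = a[0]
--     for i in range(1, n):
--         g = gcd(g, a[i])
--     if g != 1:
--         return False
--     for i in range(n):
--         for j in range(i+1, n):
--             if gcd(a[i]+g, a[j]+g) == 1:
--                 return False
--     return True
-- ===== SOURCE B (Python) =====
-- from math import gcd
--
-- def solve(n, a):
--     g = a[0]
--     for i in range(1, n):
--         g = gcd(g, a[i])
--     if g != 1:
--         return False
--     # two even values of a[i]+1 always share the factor 2, so a coprime pair,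
--     # if any exists, must involve an odd value: scan odd-odd and odd-even pairs only
--     c = [a[i] + 1 for i in range(n)]
--     odds = [x for x in c if x % 2 != 0]
--     evens = [x for x in c if x % 2 == 0]
--     rest = odds
--     while rest:
--         x, rest = rest[0], rest[1:]
--         if any(gcd(x, y) == 1 for y in rest):
--             return False
--         if any(gcd(x, y) == 1 for y in evens):
--             return False
--     return True
-- ===== Notes on version B (the rewrite author's own statement) =====
-- stated objective: alternative
-- what changed: B partitions the shifted values a[i]+1 by parity and scans only odd-odd and odd-even pairs, since two even values always share the factor 2, instead of A's scan over all index pairs.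
import Mathlib
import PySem

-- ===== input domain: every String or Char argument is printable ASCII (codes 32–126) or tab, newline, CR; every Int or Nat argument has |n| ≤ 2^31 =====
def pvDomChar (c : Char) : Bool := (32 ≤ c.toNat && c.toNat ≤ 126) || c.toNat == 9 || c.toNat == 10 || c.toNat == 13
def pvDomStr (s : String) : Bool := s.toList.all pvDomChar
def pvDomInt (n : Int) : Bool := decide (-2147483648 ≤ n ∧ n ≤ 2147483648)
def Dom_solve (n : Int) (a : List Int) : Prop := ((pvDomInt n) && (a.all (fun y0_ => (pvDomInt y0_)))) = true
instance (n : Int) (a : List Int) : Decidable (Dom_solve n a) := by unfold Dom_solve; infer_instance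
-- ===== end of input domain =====

-- B partitions the shifted values a[i]+1 by parity and scans only odd–odd and odd–even
-- pairs (two even values always share the factor 2); same result, alternative pair scan.


-- ===== PORT A =====
def solve (n : Int) (a : List Int) : Bool :=
  let g := (PySem.List.pyRange 1 n 1).foldl
    (fun g i => (Int.gcd g (PySem.List.pyGetD a i 0) : Int)) (PySem.List.pyGetD a 0 0)
  if g ≠ 1 then false
  else
    (PySem.List.pyRange 0 n 1).all (fun i =>
      (PySem.List.pyRange (i + 1) n 1).all (fun j =>
        !(Int.gcd (PySem.List.pyGetD a i 0 + g) (PySem.List.pyGetD a j 0 + g) == 1)))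

-- ===== PORT B =====
-- the 'while rest:' loop of Source B: returns true iff it would 'return False'
def copScan (evens : List Int) : List Int → Bool
  | [] => false
  | x :: rest =>
      rest.any (fun y => Int.gcd x y == 1) || evens.any (fun y => Int.gcd x y == 1)
        || copScan evens rest

def solve_alt (n : Int) (a : List Int) : Bool :=
  let g := (PySem.List.pyRange 1 n 1).foldl
    (fun g i => (Int.gcd g (PySem.List.pyGetD a i 0) : Int)) (PySem.List.pyGetD a 0 0)
  if g ≠ 1 then false
  else
    let c := (PySem.List.pyRange 0 n 1).map (fun i => PySem.List.pyGetD a i 0 + 1)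
    let odds := c.filter (fun x => !(PySem.Int.mod x 2 == 0))
    let evens := c.filter (fun x => PySem.Int.mod x 2 == 0)
    !(copScan evens odds)

-- ===== PRECONDITION & SPEC =====
-- Pre_ excludes exactly the inputs on which the Python raises IndexError: a = [] or n > len(a)
def Pre_solve (n : Int) (a : List Int) : Prop := a ≠ [] ∧ n ≤ (a.length : Int)
instance (n : Int) (a : List Int) : Decidable (Pre_solve n a) := by unfold Pre_solve; infer_instance
def pvWitness_solve : Int × List Int := (3, [2, 3, 5])

def Spec_solve (n : Int) (a : List Int) (out : Bool) : Prop := out = solve_alt n a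
instance (n : Int) (a : List Int) (out : Bool) : Decidable (Spec_solve n a out) := by unfold Spec_solve; infer_instance

-- ===== CLAIM (what is proved, stated in full; the proofs are below) =====
def Claim_equal_solve : Prop := ∀ (n : Int) (a : List Int), Dom_solve n a → Pre_solve n a → Spec_solve n a (solve n a)

-- ===== LEMMAS AND PROOFS =====

-- A's nested index loops find no coprime pair iff the mapped list is pairwise non-coprime
theorem pairScan_iff (f : Int → Int) (k : Nat) : ∀ (s n : Int), (n - s).toNat = k →
    (((PySem.List.pyRange s n 1).all (fun i =>
        (PySem.List.pyRange (i + 1) n 1).all (fun j => !(Int.gcd (f i) (f j) == 1)))) = true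
      ↔ ((PySem.List.pyRange s n 1).map f).Pairwise (fun x y => Int.gcd x y ≠ 1)) := by
  induction k with
  | zero =>
    intro s n h
    rw [PySem.List.pyRange_one_eq_nil (by omega)]
    simp
  | succ k ih =>
    intro s n h
    rw [PySem.List.pyRange_one_cons (by omega : s < n), List.all_cons, List.map_cons,
      Bool.and_eq_true, ih (s + 1) n (by omega), List.pairwise_cons]
    simp only [List.all_eq_true, List.mem_map, PySem.List.mem_pyRange_one, Bool.not_eq_eq_eq_not,
      Bool.not_true, beq_eq_false_iff_ne, ne_eq]
    constructor
    · rintro ⟨h1, h2⟩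
      exact ⟨fun y ⟨j, hj, hfj⟩ => hfj ▸ h1 j hj, h2⟩
    · rintro ⟨h1, h2⟩
      exact ⟨fun j hj => h1 (f j) ⟨j, hj, rfl⟩, h2⟩

-- B's scan finds no coprime pair iff odds are pairwise non-coprime and no odd–even pair is coprime
theorem copScan_eq_false (evens : List Int) (l : List Int) :
    copScan evens l = false ↔
      (l.Pairwise (fun x y => Int.gcd x y ≠ 1) ∧ ∀ x ∈ l, ∀ y ∈ evens, Int.gcd x y ≠ 1) := by
  induction l with
  | nil => simp [copScan]
  | cons x rest ih =>
    simp only [copScan, Bool.or_eq_false_iff, List.any_eq_false, beq_iff_eq, ih,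
      List.pairwise_cons, List.mem_cons]
    constructor
    · rintro ⟨⟨h1, h2⟩, h3, h4⟩
      exact ⟨⟨h1, h3⟩, fun z hz y hy => by
        rcases hz with rfl | hz
        · exact h2 y hy
        · exact h4 z hz y hy⟩
    · rintro ⟨⟨h1, h3⟩, h4⟩
      exact ⟨⟨h1, fun y hy => h4 x (Or.inl rfl) y hy⟩, h3,
        fun z hz y hy => h4 z (Or.inr hz) y hy⟩

-- two even integers are never coprime
theorem even_not_coprime (x y : Int) (hx : PySem.Int.mod x 2 = 0) (hy : PySem.Int.mod y 2 = 0) :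
    Int.gcd x y ≠ 1 := by
  rw [PySem.Int.mod_eq_zero_iff_dvd] at hx hy
  intro h
  have h2 : (2 : Nat) ∣ Int.gcd x y :=
    Nat.dvd_gcd (Int.natAbs_dvd_natAbs.mpr hx) (Int.natAbs_dvd_natAbs.mpr hy)
  rw [h] at h2
  omega

theorem even_pairwise (l : List Int) (h : ∀ x ∈ l, PySem.Int.mod x 2 = 0) :
    l.Pairwise (fun x y => Int.gcd x y ≠ 1) := by
  induction l with
  | nil => simp
  | cons x rest ih =>
    simp only [List.mem_cons] at h
    exact List.pairwise_cons.mpr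
      ⟨fun y hy => even_not_coprime x y (h x (Or.inl rfl)) (h y (Or.inr hy)),
        ih (fun z hz => h z (Or.inr hz))⟩

theorem solve_eq_alt (n : Int) (a : List Int) : solve n a = solve_alt n a := by
  simp only [solve, solve_alt]
  split_ifs with hg
  · rfl
  · rw [not_ne_iff] at hg
    rw [hg]
    set c := (PySem.List.pyRange 0 n 1).map (fun i => PySem.List.pyGetD a i 0 + 1) with hc
    set odds := c.filter (fun x => !(PySem.Int.mod x 2 == 0)) with hodds
    set evens := c.filter (fun x => PySem.Int.mod x 2 == 0) with hevens
    rw [Bool.eq_iff_iff, Bool.not_eq_true', copScan_eq_false,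
      pairScan_iff (fun i => PySem.List.pyGetD a i 0 + 1) (n - 0).toNat 0 n rfl]
    have hperm : List.Perm (odds ++ evens) c := by
      have hp := List.filter_append_perm (fun x => !(PySem.Int.mod x 2 == 0)) c
      simpa only [Bool.not_not] using hp
    have hsym : ∀ {x y : Int}, Int.gcd x y ≠ 1 → Int.gcd y x ≠ 1 := by
      intro x y hxy; rwa [Int.gcd_comm]
    rw [← hc]
    constructor
    · intro hpc
      have hpa : (odds ++ evens).Pairwise (fun x y => Int.gcd x y ≠ 1) :=
        hpc.perm hperm.symm hsym
      rw [List.pairwise_append] at hpa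
      exact ⟨hpa.1, hpa.2.2⟩
    · rintro ⟨h1, h2⟩
      have hevensPw : evens.Pairwise (fun x y => Int.gcd x y ≠ 1) := by
        apply even_pairwise
        intro x hx
        have hx0 := List.of_mem_filter hx
        simpa using hx0
      exact (List.pairwise_append.mpr ⟨h1, hevensPw, h2⟩).perm hperm hsym

-- ===== VERDICT (by name: the statement is the Claim_ definition above) =====
theorem solve_spec : Claim_equal_solve := by
  intro n a _ _
  exact solve_eq_alt n a
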